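-- pv_equiv track=rewrite | github.com/pty0220/Diffusion3D | scripts/sample.py | createDivisionList
-- ===== SOURCE A (Python) =====
-- def createDivisionList(number, divisor):
--     divisor = len(divisor)
--
--     if divisor==0:
--         divisor = 1
--
--     quotient = number // divisor
--     remainder = number % divisor
--     result = [quotient] * divisor
--
--     for i in range(remainder):
--         result[i] += 1
--
--     return result
-- ===== SOURCE B (Python) =====
-- def createDivisionList(number, divisor):
--     d = len(divisor) or 1
--     return [(number + d - 1 - i) // d for i in range(d)]
-- ===== Notes on version B (the rewrite author's own statement) =====
-- stated objective: alternative
-- what changed: B never computes quotient/remainder or patches a list: each slot i is computed independently by the closed form (number + d - 1 - i)//d, which yields quotient+1 exactly on the first number%d positions; the result is a single comprehension over the indices.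
import Mathlib
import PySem

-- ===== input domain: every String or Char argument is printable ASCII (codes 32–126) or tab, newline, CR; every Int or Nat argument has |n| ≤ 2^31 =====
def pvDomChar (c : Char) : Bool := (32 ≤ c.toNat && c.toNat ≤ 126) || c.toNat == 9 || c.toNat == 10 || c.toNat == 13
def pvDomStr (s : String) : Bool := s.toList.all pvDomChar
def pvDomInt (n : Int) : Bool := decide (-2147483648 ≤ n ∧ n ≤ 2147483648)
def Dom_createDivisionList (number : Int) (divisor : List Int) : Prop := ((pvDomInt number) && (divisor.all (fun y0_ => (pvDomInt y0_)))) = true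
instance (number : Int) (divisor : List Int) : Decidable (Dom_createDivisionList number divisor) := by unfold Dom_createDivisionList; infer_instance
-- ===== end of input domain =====

-- B computes each slot independently by the closed form (number + d - 1 - i)//d instead of A's
-- replicate-then-patch loop; objective: alternative decomposition of the same O(d) computation.

-- ===== PORT A =====
def createDivisionList (number : Int) (divisor : List Int) : List Int :=
  let d0 : Nat := divisor.length
  let d : Nat := if d0 == 0 then 1 else d0
  let quotient : Int := PySem.Int.floordiv number (d : Int)
  let remainder : Int := PySem.Int.mod number (d : Int)
  let result : List Int := List.replicate d quotient
  (PySem.List.pyRange 0 remainder 1).foldl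
    (fun res i => res.set i.toNat (res.getD i.toNat 0 + 1)) result

-- ===== PORT B =====
def createDivisionList_alt (number : Int) (divisor : List Int) : List Int :=
  let d : Nat := if divisor.length == 0 then 1 else divisor.length  -- `len(divisor) or 1`
  (List.range d).map (fun (i : Nat) => PySem.Int.floordiv (number + (d : Int) - 1 - (i : Int)) (d : Int))

-- ===== PRECONDITION & SPEC =====
def Spec_createDivisionList (number : Int) (divisor : List Int) (out : List Int) : Prop := out = createDivisionList_alt number divisor
instance (number : Int) (divisor : List Int) (out : List Int) : Decidable (Spec_createDivisionList number divisor out) := by unfold Spec_createDivisionList; infer_instance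

-- ===== CLAIM =====
def Claim_equal_createDivisionList : Prop := ∀ (number : Int) (divisor : List Int), Dom_createDivisionList number divisor → Spec_createDivisionList number divisor (createDivisionList number divisor)

-- ===== LEMMAS AND PROOFS =====

-- reading position k of the two-block state gives the old value q (k entries already patched, k < d)
theorem pv_getD_blocks (q : Int) (k d : Nat) (hk : k < d) :
    (List.replicate k (q + 1) ++ List.replicate (d - k) q).getD k 0 = q := by
  have hdk : d - k = (d - (k + 1)) + 1 := by omega
  rw [hdk, List.replicate_succ]
  rw [List.getD_eq_getElem?_getD, List.getElem?_append_right (by simp)]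
  simp

-- patching position k of the two-block state extends the (q+1)-block by one
theorem pv_set_blocks (q : Int) (k d : Nat) (hk : k < d) :
    (List.replicate k (q + 1) ++ List.replicate (d - k) q).set k (q + 1)
      = List.replicate (k + 1) (q + 1) ++ List.replicate (d - (k + 1)) q := by
  have hdk : d - k = (d - (k + 1)) + 1 := by omega
  rw [hdk, List.replicate_succ, List.replicate_succ' (n := k)]
  rw [List.set_append_right _ _ (by simp)]
  simp

-- loop invariant: after the first k iterations A's state is the two-block list
theorem pv_loop (q : Int) (d : Nat) :
    ∀ k : Nat, k ≤ d →
      (List.range k).foldl (fun res j => res.set j (res.getD j 0 + 1)) (List.replicate d q)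
        = List.replicate k (q + 1) ++ List.replicate (d - k) q := by
  intro k
  induction k with
  | zero => simp
  | succ k ih =>
    intro hk
    rw [List.range_succ, List.foldl_append, ih (by omega)]
    simp only [List.foldl_cons, List.foldl_nil]
    rw [pv_getD_blocks q k d (by omega), pv_set_blocks q k d (by omega)]

-- B's closed form at slot i equals quotient+1 on the first remainder slots and quotient after
theorem pv_slot (number : Int) (d i : Nat) (hd : 0 < d) (hi : i < d) :
    PySem.Int.floordiv (number + (d : Int) - 1 - (i : Int)) (d : Int)
      = if (i : Int) < PySem.Int.mod number (d : Int)
        then PySem.Int.floordiv number (d : Int) + 1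
        else PySem.Int.floordiv number (d : Int) := by
  have hdint : (0 : Int) < (d : Int) := by exact_mod_cast hd
  have hqr : PySem.Int.floordiv number (d : Int) * (d : Int) + PySem.Int.mod number (d : Int) = number :=
    PySem.Int.floordiv_mul_add_mod number (d : Int)
  have hr0 : 0 ≤ PySem.Int.mod number (d : Int) := PySem.Int.mod_nonneg number hdint
  have hrd : PySem.Int.mod number (d : Int) < (d : Int) := PySem.Int.mod_lt number hdint
  have hiint : (i : Int) < (d : Int) := by exact_mod_cast hi
  have hi0 : (0 : Int) ≤ (i : Int) := by positivity
  rw [PySem.Int.floordiv_eq_iff_of_pos hdint]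
  split <;> rename_i h <;> constructor <;> nlinarith

-- ===== VERDICT =====
theorem createDivisionList_spec : Claim_equal_createDivisionList := by
  intro number divisor _
  unfold Spec_createDivisionList createDivisionList createDivisionList_alt
  simp only []
  set d0 : Nat := divisor.length with hd0
  set d : Nat := if d0 == 0 then 1 else d0 with hd
  have hdpos : 0 < d := by
    rw [hd]; split
    · omega
    · rename_i h; simp at h; omega
  have hdint : (0:Int) < (d : Int) := by exact_mod_cast hdpos
  set q : Int := PySem.Int.floordiv number (d : Int) with hq
  set r : Int := PySem.Int.mod number (d : Int) with hr
  have hr0 : 0 ≤ r := by rw [hr]; exact PySem.Int.mod_nonneg number hdint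
  have hrd : r < (d : Int) := by rw [hr]; exact PySem.Int.mod_lt number hdint
  have hrange : PySem.List.pyRange 0 r 1 = (List.range r.toNat).map (fun j => Int.ofNat j) := by
    rw [PySem.List.pyRange_one]; norm_num
  rw [hrange, List.foldl_map]
  simp only [Int.toNat_natCast, Int.ofNat_eq_natCast]
  have hA : (List.range r.toNat).foldl (fun res j => res.set j (res.getD j 0 + 1)) (List.replicate d q)
      = List.replicate r.toNat (q + 1) ++ List.replicate (d - r.toNat) q := by
    simpa using pv_loop q d r.toNat (by omega)
  rw [hA]
  apply List.ext_getElem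
  · simp; omega
  · intro i h1 h2
    have hid : i < d := by simpa using h2
    rw [List.getElem_map, List.getElem_range, pv_slot number d i hdpos hid, ← hq, ← hr]
    by_cases hir : (i : Int) < r
    · have hirn : i < r.toNat := by omega
      rw [if_pos hir, List.getElem_append_left (by simpa using hirn)]
      simp
    · have hirn : r.toNat ≤ i := by omega
      rw [if_neg hir, List.getElem_append_right (by simpa using hirn)]
      simp
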